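-- pv_equiv track=rewrite | github.com/selfteaching/selfteaching-python-camp | 19100205/NewCeasar1978/mymodule/Think_Python_modules.py | is_triple_double
-- ===== SOURCE A (Python) =====
-- def is_triple_double(word):
--     '''判断一个单词中是否存在三次连续的重复字母，例如，aabbcc
--     '''
--     if len(word) < 6:
--         return False
--     else:
--         for i in range(len(word)-5): #注意此处的 range 边界
--             if word[i] == word[i+1] and word[i+2] == word[i+3] and word[i+4] == word[i+5]:
--                 return True
--         return False
-- ===== SOURCE B (Python) =====
-- def is_triple_double(word):
--     '''判断一个单词中是否存在三次连续的重复字母，例如，aabbcc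
--     '''
--     # Decompose the word into NON-OVERLAPPING adjacent pairs, once per starting
--     # parity, and look for a run of 3 consecutive equal pairs.  A qualifying
--     # window at j uses the pairs (j,j+1),(j+2,j+3),(j+4,j+5), which are three
--     # consecutive pairs of the parity-(j%2) chunking, and conversely.
--     for p in (0, 1):
--         streak = 0
--         i = p
--         while i + 1 < len(word):
--             if word[i] == word[i + 1]:
--                 streak += 1
--                 if streak == 3:
--                     return True
--             else:
--                 streak = 0
--             i += 2
--     return False
-- ===== Notes on version B (the rewrite author's own statement) =====
-- stated objective: alternative
-- what changed: Instead of A's sliding window that tests three pair-equalities at offsets 0,2,4 of every index, B decomposes the word into non-overlapping adjacent pairs (one pass per starting parity) and searches for a run of 3 consecutive equal pairs with a streak counter, doing one comparison per character examined.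
import Mathlib
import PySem

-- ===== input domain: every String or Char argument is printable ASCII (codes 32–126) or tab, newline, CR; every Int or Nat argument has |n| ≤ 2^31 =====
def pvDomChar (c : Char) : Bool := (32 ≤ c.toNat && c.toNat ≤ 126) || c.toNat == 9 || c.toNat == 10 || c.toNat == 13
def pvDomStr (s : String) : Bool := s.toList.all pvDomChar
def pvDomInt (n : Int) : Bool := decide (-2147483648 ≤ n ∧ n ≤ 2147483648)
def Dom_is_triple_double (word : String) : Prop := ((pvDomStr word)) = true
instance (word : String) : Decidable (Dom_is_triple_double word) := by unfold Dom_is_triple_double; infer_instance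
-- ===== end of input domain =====

-- B replaces A's sliding window of three pair comparisons per index by two parity passes over
-- NON-OVERLAPPING adjacent pairs, counting runs of equal pairs (objective: alternative).

-- ===== PORT A =====
-- A: guard len(word) < 6, then for i in range(len(word)-5) test the three pair equalities, early-return True.
def is_triple_double (word : String) : Bool :=
  let l := word.toList
  if l.length < 6 then false
  else
    (PySem.List.pyRange 0 ((l.length : Int) - 5) 1).any (fun i =>
      (PySem.List.pyGetD l i ' ' == PySem.List.pyGetD l (i+1) ' ') &&
      (PySem.List.pyGetD l (i+2) ' ' == PySem.List.pyGetD l (i+3) ' ') &&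
      (PySem.List.pyGetD l (i+4) ' ' == PySem.List.pyGetD l (i+5) ' '))

-- ===== PORT B =====
-- B's while loop 'i += 2' over word[p:]: structural recursion two chars at a time, carrying streak.
def pvScan2 : List Char → Int → Bool
  | a :: b :: rest, streak =>
      if a == b then
        if streak + 1 == 3 then true else pvScan2 rest (streak + 1)
      else pvScan2 rest 0
  | _, _ => false

-- B: for p in (0, 1): run the streak scan over the pairs of word[p:].
def is_triple_double_alt (word : String) : Bool :=
  pvScan2 word.toList 0 || pvScan2 (word.toList.drop 1) 0

-- ===== PRECONDITION & SPEC =====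
def Spec_is_triple_double (word : String) (out : Bool) : Prop := out = is_triple_double_alt word
instance (word : String) (out : Bool) : Decidable (Spec_is_triple_double word out) := by unfold Spec_is_triple_double; infer_instance

-- ===== CLAIM (what is proved, stated in full; the proofs are below) =====
def Claim_equal_is_triple_double : Prop := ∀ (word : String), Dom_is_triple_double word → Spec_is_triple_double word (is_triple_double word)

-- ===== LEMMAS AND PROOFS =====

-- the condition both programs detect, stated over getElem?
def tripleAt (l : List Char) (j : Nat) : Prop :=
  j + 5 < l.length ∧ l[j]? = l[j+1]? ∧ l[j+2]? = l[j+3]? ∧ l[j+4]? = l[j+5]?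

-- pair k of the chunking of l into non-overlapping adjacent pairs is a double
def dbl (l : List Char) (k : Nat) : Prop :=
  2*k+1 < l.length ∧ l[2*k]? = l[2*k+1]?

lemma dbl_zero (a b : Char) (r : List Char) : dbl (a :: b :: r) 0 ↔ a = b := by
  simp [dbl]

lemma dbl_succ (a b : Char) (r : List Char) (k : Nat) :
    dbl (a :: b :: r) (k+1) ↔ dbl r k := by
  have h1 : 2*(k+1) = (2*k+1) + 1 := by omega
  have h2 : 2*(k+1)+1 = (2*k+1+1) + 1 := by omega
  simp only [dbl, h1, List.getElem?_cons_succ, List.length_cons]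
  exact ⟨fun ⟨h, e⟩ => ⟨by omega, e⟩, fun ⟨h, e⟩ => ⟨by omega, e⟩⟩

-- the invariant of the streak scan: found ↔ a run of 3 doubles, possibly started by the carried streak
lemma scan2_iff : ∀ (l : List Char) (s : Int), (s = 0 ∨ s = 1 ∨ s = 2) →
    (pvScan2 l s = true ↔
      ((s = 2 ∧ dbl l 0) ∨ (1 ≤ s ∧ dbl l 0 ∧ dbl l 1) ∨
        ∃ k, dbl l k ∧ dbl l (k+1) ∧ dbl l (k+2)))
  | [], s, hs => by simp [pvScan2, dbl]
  | [a], s, hs => by simp [pvScan2, dbl]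
  | a :: b :: r, s, hs => by
      by_cases hab : a = b
      · have dl0 : dbl (a :: b :: r) 0 := (dbl_zero a b r).mpr hab
        by_cases hs2 : s = 2
        · subst hs2
          have hL : pvScan2 (a :: b :: r) 2 = true := by
            simp only [pvScan2]
            rw [if_pos (beq_iff_eq.mpr hab), if_pos (by norm_num)]
          rw [hL]
          simp only [true_iff]
          exact Or.inl ⟨by trivial, dl0⟩
        · have hL : pvScan2 (a :: b :: r) s = pvScan2 r (s + 1) := by
            simp only [pvScan2]
            rw [if_pos (beq_iff_eq.mpr hab), if_neg (by simp only [beq_iff_eq]; omega)]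
          rw [hL, scan2_iff r (s + 1) (by omega)]
          constructor
          · rintro (⟨h1, hr0⟩ | ⟨-, hr0, hr1⟩ | ⟨k, h1, h2, h3⟩)
            · exact Or.inr (Or.inl ⟨by omega, dl0, (dbl_succ a b r 0).mpr hr0⟩)
            · exact Or.inr (Or.inr ⟨0, dl0, (dbl_succ a b r 0).mpr hr0,
                (dbl_succ a b r 1).mpr hr1⟩)
            · exact Or.inr (Or.inr ⟨k + 1, (dbl_succ a b r k).mpr h1,
                (dbl_succ a b r (k+1)).mpr h2, (dbl_succ a b r (k+2)).mpr h3⟩)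
          · rintro (⟨h1, -⟩ | ⟨h1, -, hl1⟩ | ⟨k, h1, h2, h3⟩)
            · exact absurd h1 hs2
            · exact Or.inl ⟨by omega, (dbl_succ a b r 0).mp hl1⟩
            · cases k with
              | zero => exact Or.inr (Or.inl ⟨by omega, (dbl_succ a b r 0).mp h2,
                  (dbl_succ a b r 1).mp h3⟩)
              | succ k' => exact Or.inr (Or.inr ⟨k', (dbl_succ a b r k').mp h1,
                  (dbl_succ a b r (k'+1)).mp h2, (dbl_succ a b r (k'+2)).mp h3⟩)
      · have ndl0 : ¬ dbl (a :: b :: r) 0 := fun h => hab ((dbl_zero a b r).mp h)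
        have hL : pvScan2 (a :: b :: r) s = pvScan2 r 0 := by
          simp only [pvScan2]
          rw [if_neg (by simp only [beq_iff_eq]; exact hab)]
        rw [hL, scan2_iff r 0 (Or.inl rfl)]
        constructor
        · rintro (⟨h1, -⟩ | ⟨h1, -⟩ | ⟨k, h1, h2, h3⟩)
          · omega
          · omega
          · exact Or.inr (Or.inr ⟨k + 1, (dbl_succ a b r k).mpr h1,
              (dbl_succ a b r (k+1)).mpr h2, (dbl_succ a b r (k+2)).mpr h3⟩)
        · rintro (⟨-, h⟩ | ⟨-, h, -⟩ | ⟨k, h1, h2, h3⟩)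
          · exact absurd h ndl0
          · exact absurd h ndl0
          · cases k with
            | zero => exact absurd h1 ndl0
            | succ k' => exact Or.inr (Or.inr ⟨k', (dbl_succ a b r k').mp h1,
                (dbl_succ a b r (k'+1)).mp h2, (dbl_succ a b r (k'+2)).mp h3⟩)

-- a run of three doubles at chunk k of parity 0 is A's window at index 2k
lemma dbl_triple_even (l : List Char) (k : Nat) :
    (dbl l k ∧ dbl l (k+1) ∧ dbl l (k+2)) ↔ tripleAt l (2*k) := by
  have e1 : 2*(k+1) = 2*k+2 := by omega
  have e2 : 2*(k+1)+1 = 2*k+3 := by omega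
  have e3 : 2*(k+2) = 2*k+4 := by omega
  have e4 : 2*(k+2)+1 = 2*k+5 := by omega
  simp only [dbl, tripleAt, e1, e3]
  constructor
  · rintro ⟨⟨-, p1⟩, ⟨-, p2⟩, h3, p3⟩
    exact ⟨by omega, p1, p2, p3⟩
  · rintro ⟨h, p1, p2, p3⟩
    exact ⟨⟨by omega, p1⟩, ⟨by omega, p2⟩, by omega, p3⟩

-- chunk k of the tail is the pair (2k+1, 2k+2) of l
lemma dbl_drop_one (l : List Char) (k : Nat) :
    dbl (l.drop 1) k ↔ (2*k+2 < l.length ∧ l[2*k+1]? = l[2*k+2]?) := by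
  simp only [dbl, List.getElem?_drop, List.length_drop]
  have e1 : 1 + 2*k = 2*k+1 := by omega
  have e2 : 1 + (2*k+1) = 2*k+2 := by omega
  rw [e1, e2]
  exact ⟨fun ⟨h, e⟩ => ⟨by omega, e⟩, fun ⟨h, e⟩ => ⟨by omega, e⟩⟩

lemma dbl_triple_odd (l : List Char) (k : Nat) :
    (dbl (l.drop 1) k ∧ dbl (l.drop 1) (k+1) ∧ dbl (l.drop 1) (k+2)) ↔ tripleAt l (2*k+1) := by
  have e1 : 2*(k+1)+1 = 2*k+3 := by omega
  have e2 : 2*(k+1)+2 = 2*k+4 := by omega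
  have e3 : 2*(k+2)+1 = 2*k+5 := by omega
  have e4 : 2*(k+2)+2 = 2*k+6 := by omega
  rw [dbl_drop_one, dbl_drop_one, dbl_drop_one, e1, e2, e3, e4]
  have f1 : 2*k+1+1 = 2*k+2 := by omega
  have f2 : 2*k+1+2 = 2*k+3 := by omega
  have f3 : 2*k+1+3 = 2*k+4 := by omega
  have f4 : 2*k+1+4 = 2*k+5 := by omega
  have f5 : 2*k+1+5 = 2*k+6 := by omega
  simp only [tripleAt, f1, f2, f3, f4, f5]
  constructor
  · rintro ⟨⟨-, p1⟩, ⟨-, p2⟩, h3, p3⟩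
    exact ⟨by omega, p1, p2, p3⟩
  · rintro ⟨h, p1, p2, p3⟩
    exact ⟨⟨by omega, p1⟩, ⟨by omega, p2⟩, by omega, p3⟩

lemma alt_iff (word : String) :
    is_triple_double_alt word = true ↔ ∃ j, tripleAt word.toList j := by
  set l := word.toList with hl
  simp only [is_triple_double_alt, ← hl, Bool.or_eq_true,
    scan2_iff l 0 (Or.inl rfl), scan2_iff (l.drop 1) 0 (Or.inl rfl)]
  constructor
  · rintro ((⟨h, -⟩ | ⟨h, -⟩ | ⟨k, h⟩) | (⟨h, -⟩ | ⟨h, -⟩ | ⟨k, h⟩))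
    · omega
    · omega
    · exact ⟨2*k, (dbl_triple_even l k).mp h⟩
    · omega
    · omega
    · exact ⟨2*k+1, (dbl_triple_odd l k).mp h⟩
  · rintro ⟨j, hj⟩
    obtain ⟨k, hk | hk⟩ : ∃ k, j = 2*k ∨ j = 2*k+1 := ⟨j / 2, by omega⟩
    · subst hk
      exact Or.inl (Or.inr (Or.inr ⟨k, (dbl_triple_even l k).mpr hj⟩))
    · subst hk
      exact Or.inr (Or.inr (Or.inr ⟨k, (dbl_triple_odd l k).mpr hj⟩))

lemma pyGetD_nat (l : List Char) (j : Nat) (h : j < l.length) :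
    PySem.List.pyGetD l (j : Int) ' ' = l[j] := by
  rw [PySem.List.pyGetD_natCast]
  exact List.getD_eq_getElem l ' ' h

lemma a_iff (word : String) :
    is_triple_double word = true ↔ ∃ j, tripleAt word.toList j := by
  simp only [is_triple_double]
  set l := word.toList with hl
  split
  · rename_i hlen
    simp only [Bool.false_eq_true, false_iff]
    rintro ⟨j, hlt, -⟩
    omega
  · rename_i hlen
    push Not at hlen
    rw [List.any_eq_true]
    have cast1 : ∀ j : Nat, (j : Int) + 1 = ((j + 1 : Nat) : Int) := by intro j; push_cast; ring
    have cast2 : ∀ j : Nat, (j : Int) + 2 = ((j + 2 : Nat) : Int) := by intro j; push_cast; ring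
    have cast3 : ∀ j : Nat, (j : Int) + 3 = ((j + 3 : Nat) : Int) := by intro j; push_cast; ring
    have cast4 : ∀ j : Nat, (j : Int) + 4 = ((j + 4 : Nat) : Int) := by intro j; push_cast; ring
    have cast5 : ∀ j : Nat, (j : Int) + 5 = ((j + 5 : Nat) : Int) := by intro j; push_cast; ring
    constructor
    · rintro ⟨i, hmem, hP⟩
      rw [PySem.List.mem_pyRange_one] at hmem
      obtain ⟨h0, hub⟩ := hmem
      set j := i.toNat with hj
      have hi : i = (j : Int) := by omega
      have hj5 : j + 5 < l.length := by omega
      rw [hi, cast1 j, cast2 j, cast3 j, cast4 j, cast5 j,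
        pyGetD_nat l j (by omega), pyGetD_nat l (j+1) (by omega),
        pyGetD_nat l (j+2) (by omega), pyGetD_nat l (j+3) (by omega),
        pyGetD_nat l (j+4) (by omega), pyGetD_nat l (j+5) (by omega)] at hP
      simp only [Bool.and_eq_true, beq_iff_eq] at hP
      obtain ⟨⟨hP1, hP2⟩, hP3⟩ := hP
      refine ⟨j, hj5, ?_, ?_, ?_⟩
      · rw [List.getElem?_eq_getElem (by omega : j < l.length),
          List.getElem?_eq_getElem (by omega : j + 1 < l.length)]
        exact congrArg some hP1
      · rw [List.getElem?_eq_getElem (by omega : j + 2 < l.length),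
          List.getElem?_eq_getElem (by omega : j + 3 < l.length)]
        exact congrArg some hP2
      · rw [List.getElem?_eq_getElem (by omega : j + 4 < l.length),
          List.getElem?_eq_getElem (by omega : j + 5 < l.length)]
        exact congrArg some hP3
    · rintro ⟨j, hj5, e1, e2, e3⟩
      rw [List.getElem?_eq_getElem (by omega : j < l.length),
        List.getElem?_eq_getElem (by omega : j + 1 < l.length)] at e1
      rw [List.getElem?_eq_getElem (by omega : j + 2 < l.length),
        List.getElem?_eq_getElem (by omega : j + 3 < l.length)] at e2
      rw [List.getElem?_eq_getElem (by omega : j + 4 < l.length),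
        List.getElem?_eq_getElem (by omega : j + 5 < l.length)] at e3
      refine ⟨(j : Int), by rw [PySem.List.mem_pyRange_one]; omega, ?_⟩
      rw [cast1 j, cast2 j, cast3 j, cast4 j, cast5 j,
        pyGetD_nat l j (by omega), pyGetD_nat l (j+1) (by omega),
        pyGetD_nat l (j+2) (by omega), pyGetD_nat l (j+3) (by omega),
        pyGetD_nat l (j+4) (by omega), pyGetD_nat l (j+5) (by omega)]
      simp only [Bool.and_eq_true, beq_iff_eq]
      exact ⟨⟨Option.some.inj e1, Option.some.inj e2⟩, Option.some.inj e3⟩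

-- ===== VERDICT (by name: the statement is the Claim_ definition above) =====
theorem is_triple_double_spec : Claim_equal_is_triple_double := by
  intro word _
  unfold Spec_is_triple_double
  rw [Bool.eq_iff_iff, a_iff, alt_iff]
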